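-- pv_equiv track=rewrite | github.com/abhartia/wadecv | backend/app/services/scraper.py | _strip_application_form_junk
-- ===== SOURCE A (Python) =====
-- _FORM_START_MARKERS = [
--     "indicates a required field",
--     "Autofill with MyGreenhouse",
--     "Create a Job Alert",
--     "Create alert",
--     "Apply for this job",
--     "First Name\n*",
--     "Resume/CV\n*",
--     "Dropbox\nGoogle Drive",
--     "Please choose your preferred office locations",
--     "Accepted file types: pdf, doc, docx",
--     "How did you hear about us?",
--     "How did you hear about ",
--     "Submit application",
--     "We do not accept unsolicited resumes",
--     "Any employment agency",
-- ]
--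
-- _LEADING_NAV_LINES = ("back to jobs", "back to search", "apply")
--
-- def _strip_application_form_junk(text: str) -> str:
--     """Truncate at the first occurrence of form/footer markers and strip leading nav so the box gets only role content."""
--     if not text or len(text) < 50:
--         return text
--     # Drop leading lines that are just navigation (e.g. "Back to jobs", "Apply")
--     lines = text.split("\n")
--     while lines and lines[0].strip().lower() in _LEADING_NAV_LINES:
--         lines.pop(0)
--     text = "\n".join(lines).lstrip()
--
--     lower = text.lower()
--     cut = len(text)
--     for marker in _FORM_START_MARKERS:
--         idx = lower.find(marker.lower())
--         if idx != -1 and idx < cut: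
--             cut = idx
--     if cut < len(text):
--         text = text[:cut]
--     text = text.rstrip()
--     # Remove trailing hashtag like #LI-HA1
--     while text and text.split() and text.split()[-1].startswith("#"):
--         text = text[: text.rfind(text.split()[-1])].rstrip()
--     return text
-- ===== SOURCE B (Python) =====
-- _LEADING_NAV_LINES = ("back to jobs", "back to search", "apply")
--
-- # the form/footer markers of A, pre-lowered once
-- _MARKERS_LOWER = [
--     "indicates a required field",
--     "autofill with mygreenhouse",
--     "create a job alert",
--     "create alert",
--     "apply for this job",
--     "first name\n*",
--     "resume/cv\n*",
--     "dropbox\ngoogle drive",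
--     "please choose your preferred office locations",
--     "accepted file types: pdf, doc, docx",
--     "how did you hear about us?",
--     "how did you hear about ",
--     "submit application",
--     "we do not accept unsolicited resumes",
--     "any employment agency",
-- ]
--
--
-- def _strip_application_form_junk(text: str) -> str:
--     if len(text) < 50:
--         return text
--     # skip leading navigation-only lines by advancing an index
--     lines = text.split("\n")
--     k = 0
--     while k < len(lines) and lines[k].strip().lower() in _LEADING_NAV_LINES:
--         k += 1
--     text = "\n".join(lines[k:]).lstrip()
--
--     # ONE left-to-right scan: cut at the first position where any marker starts
--     # (instead of one full find() pass per marker tracking a running minimum)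
--     lower = text.lower()
--     cut = len(text)
--     for j in range(len(lower)):
--         if any(lower.startswith(m, j) for m in _MARKERS_LOWER):
--             cut = j
--             break
--     text = text[:cut]
--
--     # ONE right-to-left scan dropping trailing whitespace and '#...' tokens
--     # (instead of repeated split()/rfind()/rstrip() passes)
--     end = len(text)
--     while True:
--         while end and text[end - 1].isspace():
--             end -= 1
--         w = end
--         while w and not text[w - 1].isspace():
--             w -= 1
--         if w < end and text[w] == "#":
--             end = w
--         else:
--             return text[:end]
-- ===== Notes on version B (the rewrite author's own statement) =====
-- stated objective: alternative
-- what changed: The 15 repeated full-string find() passes tracking a running minimum are replaced by one left-to-right scan that stops at the first position where any (pre-lowered) marker matches, the leading-nav pop loop by an index advance over the split lines, and the repeated split()/rfind()/rstrip() trailing-hashtag passes by one right-to-left index scan.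
import Mathlib
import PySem

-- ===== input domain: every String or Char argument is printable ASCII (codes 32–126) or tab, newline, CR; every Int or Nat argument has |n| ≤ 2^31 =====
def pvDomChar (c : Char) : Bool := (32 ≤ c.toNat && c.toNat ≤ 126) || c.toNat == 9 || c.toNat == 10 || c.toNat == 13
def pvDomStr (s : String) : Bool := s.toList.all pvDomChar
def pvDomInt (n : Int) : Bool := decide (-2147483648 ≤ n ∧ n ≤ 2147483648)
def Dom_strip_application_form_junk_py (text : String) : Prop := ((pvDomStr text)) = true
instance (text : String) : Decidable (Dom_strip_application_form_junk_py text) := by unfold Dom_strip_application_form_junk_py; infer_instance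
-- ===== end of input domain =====

-- B replaces A's per-marker find() passes by one left-to-right scan for the earliest marker hit
-- and A's repeated split()/rfind()/rstrip() passes by one right-to-left scan (objective: alternative).

-- ===== PORT A =====
-- module constants shared by the two Pythons
def pvNav : List (List Char) := ["back to jobs".toList, "back to search".toList, "apply".toList]

def pvFormMarkers : List String :=
  ["indicates a required field", "Autofill with MyGreenhouse", "Create a Job Alert",
   "Create alert", "Apply for this job", "First Name\n*", "Resume/CV\n*",
   "Dropbox\nGoogle Drive", "Please choose your preferred office locations",
   "Accepted file types: pdf, doc, docx", "How did you hear about us?",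
   "How did you hear about ", "Submit application",
   "We do not accept unsolicited resumes", "Any employment agency"]

-- A's 'while lines and lines[0].strip().lower() in _LEADING_NAV_LINES: lines.pop(0)'
def pvPopNav : List (List Char) → List (List Char)
  | [] => []
  | l :: ls =>
    if pvNav.contains (PySem.Chars.lower (PySem.Chars.strip l)) then pvPopNav ls else l :: ls

-- A's trailing-hashtag 'while' loop; fuel = len(text)+1 at the call site suffices because each
-- iteration strictly shortens text (the removed last word is nonempty)
def pvHashLoopA : Nat → List Char → List Char
  | 0, text => text
  | fuel + 1, text =>
    let words := PySem.Chars.split₀ text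
    if text ≠ [] ∧ words ≠ [] ∧ PySem.Chars.startswith (words.getLastD []) ['#'] then
      pvHashLoopA fuel
        (PySem.Chars.rstrip
          (PySem.Chars.slice text none (some (PySem.Chars.rfind text (words.getLastD [])))))
    else text

def pvStripA (text : List Char) : List Char :=
  if text.length = 0 ∨ text.length < 50 then text
  else
    let lines := pvPopNav (PySem.Chars.splitOn text ['\n'])
    let text := PySem.Chars.lstrip (PySem.Chars.join ['\n'] lines)
    let lower := PySem.Chars.lower text
    let cut : Int := pvFormMarkers.foldl
      (fun cut marker =>
        let idx := PySem.Chars.find lower (PySem.Chars.lower marker.toList)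
        if idx ≠ -1 ∧ idx < cut then idx else cut)
      (text.length : Int)
    let text := if cut < (text.length : Int) then PySem.Chars.slice text none (some cut) else text
    let text := PySem.Chars.rstrip text
    pvHashLoopA (text.length + 1) text

def strip_application_form_junk_py (text : String) : String :=
  String.ofList (pvStripA text.toList)

-- ===== PORT B =====
-- B's module constant: the markers, pre-lowered once
def pvMarkersLower : List (List Char) :=
  ["indicates a required field".toList, "autofill with mygreenhouse".toList,
   "create a job alert".toList, "create alert".toList, "apply for this job".toList,
   "first name\n*".toList, "resume/cv\n*".toList, "dropbox\ngoogle drive".toList,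
   "please choose your preferred office locations".toList,
   "accepted file types: pdf, doc, docx".toList, "how did you hear about us?".toList,
   "how did you hear about ".toList, "submit application".toList,
   "we do not accept unsolicited resumes".toList, "any employment agency".toList]

-- B's 'for j in range(len(lower)): if any(lower.startswith(m, j) …): cut = j; break'
def pvScanCut (lower : List Char) (i : Nat) : Nat :=
  if i < lower.length then
    if pvMarkersLower.any (fun m => PySem.Chars.startswith (lower.drop i) m) then i
    else pvScanCut lower (i + 1)
  else lower.length
termination_by lower.length - i

-- B's right-to-left index scan, as structural recursion on the reversed character suffix:
-- drop trailing whitespace, read the last whitespace-free run, drop it if it starts with '#'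
def pvTrimTail (r : List Char) : List Char :=
  let r1 := r.dropWhile PySem.Chars.isspace
  let w := r1.takeWhile (fun c => !PySem.Chars.isspace c)
  if h : w ≠ [] ∧ w.getLast? = some '#' then pvTrimTail (r1.drop w.length) else r1
termination_by r.length
decreasing_by
  have h1 : (r.dropWhile PySem.Chars.isspace).length ≤ r.length := r.length_dropWhile_le _
  have h2 : ((r.dropWhile PySem.Chars.isspace).takeWhile
      (fun c => !PySem.Chars.isspace c)).length ≤ (r.dropWhile PySem.Chars.isspace).length :=
    (List.takeWhile_prefix _).length_le
  have h3 : 0 < ((r.dropWhile PySem.Chars.isspace).takeWhile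
      (fun c => !PySem.Chars.isspace c)).length := List.length_pos_iff.mpr h.1
  simp only [List.length_drop]
  omega

def pvStripB (text : List Char) : List Char :=
  if text.length < 50 then text
  else
    let lines := (PySem.Chars.splitOn text ['\n']).dropWhile
      (fun l => pvNav.contains (PySem.Chars.lower (PySem.Chars.strip l)))
    let text := PySem.Chars.lstrip (PySem.Chars.join ['\n'] lines)
    let lower := PySem.Chars.lower text
    let cut := pvScanCut lower 0
    let text := PySem.Chars.slice text none (some (cut : Int))
    (pvTrimTail text.reverse).reverse

def strip_application_form_junk_py_alt (text : String) : String :=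
  String.ofList (pvStripB text.toList)

-- ===== PRECONDITION & SPEC =====
def Spec_strip_application_form_junk_py (text : String) (out : String) : Prop := out = strip_application_form_junk_py_alt text
instance (text : String) (out : String) : Decidable (Spec_strip_application_form_junk_py text out) := by unfold Spec_strip_application_form_junk_py; infer_instance

-- ===== CLAIM (what is proved, stated in full; the proofs are below) =====
def Claim_equal_strip_application_form_junk_py : Prop := ∀ (text : String), Dom_strip_application_form_junk_py text → Spec_strip_application_form_junk_py text (strip_application_form_junk_py text)

-- ===== LEMMAS AND PROOFS =====

theorem pv_popNav_eq_dropWhile (ls : List (List Char)) :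
    pvPopNav ls = ls.dropWhile (fun l => pvNav.contains (PySem.Chars.lower (PySem.Chars.strip l))) := by
  induction ls with
  | nil => rfl
  | cons l ls ih => rw [pvPopNav, List.dropWhile_cons]; split <;> simp_all

theorem pv_markers_lower :
    pvFormMarkers.map (fun m => PySem.Chars.lower m.toList) = pvMarkersLower := by decide


def pvFoldF (L : List Char) (c : Int) (m : List Char) : Int :=
  if PySem.Chars.find L m ≠ -1 ∧ PySem.Chars.find L m < c then PySem.Chars.find L m else c

theorem pvFoldF_le (L : List Char) (c : Int) (m : List Char) : pvFoldF L c m ≤ c := by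
  unfold pvFoldF; split <;> omega

theorem pv_foldA_le (L : List Char) (ms : List (List Char)) (c : Int) :
    ms.foldl (pvFoldF L) c ≤ c := by
  induction ms generalizing c with
  | nil => simp
  | cons m ms ih => exact le_trans (ih _) (pvFoldF_le L c m)

theorem pv_foldA_mem (L : List Char) (ms : List (List Char)) (c : Int) :
    ms.foldl (pvFoldF L) c = c ∨
      ∃ m ∈ ms, PySem.Chars.find L m ≠ -1 ∧ ms.foldl (pvFoldF L) c = PySem.Chars.find L m := by
  induction ms generalizing c with
  | nil => simp
  | cons m ms ih =>
    simp only [List.foldl_cons]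
    rcases ih (pvFoldF L c m) with h | ⟨m', hm', hne, he⟩
    · rw [h]
      unfold pvFoldF
      split
      · exact Or.inr ⟨m, by simp, by tauto⟩
      · exact Or.inl rfl
    · exact Or.inr ⟨m', by simp [hm'], hne, he⟩

theorem pv_foldA_le_find (L : List Char) (ms : List (List Char)) (c : Int) {m : List Char}
    (hm : m ∈ ms) (hne : PySem.Chars.find L m ≠ -1) :
    ms.foldl (pvFoldF L) c ≤ PySem.Chars.find L m := by
  induction ms generalizing c with
  | nil => simp at hm
  | cons m' ms ih =>
    simp only [List.foldl_cons]
    rcases List.mem_cons.mp hm with rfl | hm'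
    · calc ms.foldl (pvFoldF L) (pvFoldF L c m) ≤ pvFoldF L c m := pv_foldA_le L ms _
        _ ≤ PySem.Chars.find L m := by
            unfold pvFoldF; have := PySem.Chars.neg_one_le_find L m; split <;> omega
    · exact ih _ hm'


theorem pv_scan_le (L : List Char) (i : Nat) : pvScanCut L i ≤ L.length := by
  fun_induction pvScanCut L i <;> omega

theorem pv_scan_hit (L : List Char) (i : Nat) (h : pvScanCut L i < L.length) :
    pvMarkersLower.any (fun m => PySem.Chars.startswith (L.drop (pvScanCut L i)) m) = true := by
  fun_induction pvScanCut L i with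
  | case1 i h1 h2 => exact h2
  | case2 i h1 h2 ih => exact ih h
  | case3 => omega

theorem pv_scan_min (L : List Char) (i : Nat) (j : Nat) (hij : i ≤ j) (hj : j < pvScanCut L i) :
    pvMarkersLower.any (fun m => PySem.Chars.startswith (L.drop j) m) = false := by
  fun_induction pvScanCut L i with
  | case1 i h1 h2 => omega
  | case2 i h1 h2 ih =>
    rcases Nat.eq_or_lt_of_le hij with rfl | hlt
    · simpa using h2
    · exact ih hlt hj
  | case3 i h1 => have := pv_scan_le L i; omega

theorem pv_good_to_find {L m : List Char} (i : Nat) (h : m <+: L.drop i) :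
    PySem.Chars.find L m ≠ -1 ∧ (PySem.Chars.find L m).toNat ≤ i := by
  have hinf : m <:+: L := h.isInfix.trans (List.drop_suffix i L).isInfix
  have hne : PySem.Chars.find L m ≠ -1 := by
    rw [Ne, PySem.Chars.find_eq_neg_one_iff]; exact not_not_intro hinf
  refine ⟨hne, ?_⟩
  have h0 : 0 ≤ PySem.Chars.find L m := by
    have := PySem.Chars.neg_one_le_find L m; omega
  by_contra hgt
  exact (PySem.Chars.find_spec h0).2 i (by omega) h

theorem pv_cut_core (L : List Char) :
    pvMarkersLower.foldl (pvFoldF L) (L.length : Int) = (pvScanCut L 0 : Int) := by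
  have hgle := pv_scan_le L 0
  apply le_antisymm
  · by_cases hg : pvScanCut L 0 < L.length
    · obtain ⟨m, hm, hsw⟩ := List.any_eq_true.mp (pv_scan_hit L 0 hg)
      have hpre : m <+: L.drop (pvScanCut L 0) := (PySem.Chars.startswith_iff _ _).mp hsw
      obtain ⟨hne, hle⟩ := pv_good_to_find _ hpre
      have h0 : 0 ≤ PySem.Chars.find L m := by
        have := PySem.Chars.neg_one_le_find L m; omega
      have := pv_foldA_le_find L pvMarkersLower (L.length : Int) hm hne
      omega
    · have := pv_foldA_le L pvMarkersLower (L.length : Int)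
      omega
  · rcases pv_foldA_mem L pvMarkersLower (L.length : Int) with h | ⟨m, hm, hne, he⟩
    · rw [h]; exact_mod_cast hgle
    · rw [he]
      have h0 : 0 ≤ PySem.Chars.find L m := by
        have := PySem.Chars.neg_one_le_find L m; omega
      have hpre := (PySem.Chars.find_spec h0).1
      set j := (PySem.Chars.find L m).toNat with hj
      have hgood : pvMarkersLower.any
          (fun m' => PySem.Chars.startswith (L.drop j) m') = true :=
        List.any_eq_true.mpr ⟨m, hm, (PySem.Chars.startswith_iff _ _).mpr hpre⟩
      by_contra hlt
      have hlt' : j < pvScanCut L 0 := by omega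
      rw [pv_scan_min L 0 j (Nat.zero_le _) hlt'] at hgood
      exact absurd hgood (by simp)


theorem pv_go_nonspace (w : List Char) (hw : ∀ c ∈ w, PySem.Chars.isspace c = false) :
    ∀ (cur : List Char) (acc : List (List Char)), cur ≠ [] ∨ w ≠ [] →
      PySem.Chars.split₀.go w cur acc = acc.reverse ++ [cur.reverse ++ w] := by
  induction w with
  | nil =>
    intro cur acc h
    have hcur : cur ≠ [] := h.resolve_right (by simp)
    rw [PySem.Chars.split₀.go]
    simp [hcur]
  | cons c w ih =>
    intro cur acc _
    have hc : PySem.Chars.isspace c = false := hw c (by simp)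
    rw [PySem.Chars.split₀.go]
    simp only [hc]
    rw [ih (fun c' hc' => hw c' (by simp [hc'])) (c :: cur) acc (Or.inl (by simp))]
    simp

theorem pv_go_last (wR : List Char) (hwne : wR ≠ [])
    (hw : ∀ c ∈ wR, PySem.Chars.isspace c = false) :
    ∀ (a cur : List Char) (acc : List (List Char)),
      ((a = [] ∧ cur = []) ∨ (∃ csp, a.getLast? = some csp ∧ PySem.Chars.isspace csp = true)) →
      ∃ acc' : List (List Char), PySem.Chars.split₀.go (a ++ wR) cur acc = acc'.reverse ++ [wR] := by
  intro a
  induction a with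
  | nil =>
    intro cur acc h
    have hcur : cur = [] := by
      rcases h with ⟨_, h⟩ | ⟨csp, h, _⟩
      · exact h
      · simp at h
    subst hcur
    exact ⟨acc, by simpa using pv_go_nonspace wR hw [] acc (Or.inr hwne)⟩
  | cons c a ih =>
    intro cur acc h
    have hh : a ≠ [] → ∃ csp, a.getLast? = some csp ∧ PySem.Chars.isspace csp = true := by
      intro hane
      rcases h with ⟨h, _⟩ | ⟨csp, hl, hsp⟩
      · simp at h
      · obtain ⟨b, t, rfl⟩ := List.exists_cons_of_ne_nil hane
        simp only [List.getLast?_cons_cons] at hl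
        exact ⟨csp, hl, hsp⟩
    rw [List.cons_append, PySem.Chars.split₀.go]
    by_cases hc : PySem.Chars.isspace c = true
    · simp only [hc]
      have harg : (a = [] ∧ ([] : List Char) = []) ∨
          (∃ csp, a.getLast? = some csp ∧ PySem.Chars.isspace csp = true) := by
        by_cases ha : a = []
        · exact Or.inl ⟨ha, rfl⟩
        · exact Or.inr (hh ha)
      by_cases hcur : cur.isEmpty
      · simpa [hcur] using ih [] acc harg
      · simpa [hcur] using ih [] (cur.reverse :: acc) harg
    · have hc' : PySem.Chars.isspace c = false := by simpa using hc
      simp only [hc']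
      have ha : a ≠ [] := by
        rintro rfl
        rcases h with ⟨h, _⟩ | ⟨csp, hl, hsp⟩
        · simp at h
        · simp at hl
          subst hl
          simp_all
      exact ih (c :: cur) acc (Or.inr (hh ha))

theorem pv_dropWhile_cons_head {q : Char → Bool} {l t : List Char} {c : Char}
    (h : l.dropWhile q = c :: t) : q c = false := by
  induction l with
  | nil => simp at h
  | cons x xs ih =>
    rw [List.dropWhile_cons] at h
    by_cases hx : q x
    · rw [if_pos hx] at h; exact ih h
    · rw [if_neg hx] at h
      cases h
      simpa using hx

theorem pv_rfind_go (a w : List Char) :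
    ∀ k, k ≤ w.length → PySem.Chars.rfind.go (a ++ w) w (a.length + k) = (a.length : Int) := by
  intro k
  induction k with
  | zero =>
    intro _
    rw [Nat.add_zero]
    cases a with
    | nil =>
      rw [List.nil_append, List.length_nil, PySem.Chars.rfind.go]
      simp [List.isPrefixOf_iff_prefix]
    | cons x xs =>
      rw [List.length_cons, PySem.Chars.rfind.go]
      have hpre : w.isPrefixOf (List.drop (xs.length + 1) (x :: xs ++ w)) = true := by
        rw [List.cons_append, List.drop_succ_cons, List.drop_left, List.isPrefixOf_iff_prefix]
      rw [hpre]
      simp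
  | succ k ih =>
    intro hk
    rw [← Nat.add_assoc, PySem.Chars.rfind.go]
    have hnp : w.isPrefixOf (List.drop (a.length + k + 1) (a ++ w)) = false := by
      rw [← Bool.not_eq_true, List.isPrefixOf_iff_prefix]
      intro hp
      have := hp.length_le
      simp [List.length_drop, List.length_append] at this
      omega
    rw [hnp]
    simpa using ih (by omega)

theorem pv_rfind_append (a w : List Char) :
    PySem.Chars.rfind (a ++ w) w = (a.length : Int) := by
  have := pv_rfind_go a w w.length le_rfl
  rw [PySem.Chars.rfind, List.length_append]
  exact this

theorem pv_rstrip_idem (s : List Char) :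
    PySem.Chars.rstrip (PySem.Chars.rstrip s) = PySem.Chars.rstrip s := by
  simp [PySem.Chars.rstrip, List.dropWhile_idempotent]

theorem pv_rstrip_length_le (s : List Char) :
    (PySem.Chars.rstrip s).length ≤ s.length := by
  simpa [PySem.Chars.rstrip] using List.length_dropWhile_le PySem.Chars.isspace s.reverse

theorem pv_trim_dropWhile (r : List Char) :
    pvTrimTail (r.dropWhile PySem.Chars.isspace) = pvTrimTail r := by
  conv_lhs => rw [pvTrimTail]
  conv_rhs => rw [pvTrimTail]
  simp only [List.dropWhile_idempotent]

theorem pv_hash_prefix_iff (l : List Char) : (['#'] <+: l) ↔ l.head? = some '#' := by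
  cases l with
  | nil => simp
  | cons c t => simp [List.cons_prefix_cons, eq_comm]

theorem pv_tail_eq (fuel : Nat) (s : List Char) (hs : PySem.Chars.rstrip s = s)
    (hf : s.length < fuel) : pvHashLoopA fuel s = (pvTrimTail s.reverse).reverse := by
  induction fuel generalizing s with
  | zero => omega
  | succ fuel ih =>
    have hdw : List.dropWhile PySem.Chars.isspace s.reverse = s.reverse := by
      have := congrArg List.reverse hs
      simpa [PySem.Chars.rstrip] using this
    by_cases hnil : s = []
    · subst hnil
      rw [pvHashLoopA, pvTrimTail]
      simp
    · -- head of s.reverse is nonspace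
      obtain ⟨c, t, hrev⟩ : ∃ c t, s.reverse = c :: t := by
        cases h : s.reverse with
        | nil => exact absurd (by simpa using congrArg List.reverse h) hnil
        | cons c t => exact ⟨c, t, rfl⟩
      have hcns : PySem.Chars.isspace c = false := by
        cases hcs : PySem.Chars.isspace c with
        | false => rfl
        | true =>
          rw [hrev, List.dropWhile_cons, hcs] at hdw
          simp only [if_true] at hdw
          have h1 := List.length_dropWhile_le PySem.Chars.isspace t
          have h2 := congrArg List.length hdw
          simp at h2
          omega
      set q : Char → Bool := fun c => !PySem.Chars.isspace c with hq
      set w : List Char := s.reverse.takeWhile q with hwdef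
      set d : List Char := s.reverse.dropWhile q with hddef
      have hwne : w ≠ [] := by
        rw [hwdef, hrev, List.takeWhile_cons]
        simp [hq, hcns]
      have hsplit : s.reverse = w ++ d := (List.takeWhile_append_dropWhile).symm
      have hs_eq : s = d.reverse ++ w.reverse := by
        have := congrArg List.reverse hsplit
        simpa using this
      have hwns : ∀ c' ∈ w.reverse, PySem.Chars.isspace c' = false := by
        intro c' hc'
        have := List.mem_takeWhile_imp (by simpa using hc')
        simpa [hq] using this
      have hwRne : w.reverse ≠ [] := by simpa using hwne
      have harg : (d.reverse = [] ∧ ([] : List Char) = []) ∨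
          (∃ csp, d.reverse.getLast? = some csp ∧ PySem.Chars.isspace csp = true) := by
        cases hd : d with
        | nil => exact Or.inl ⟨by simp, rfl⟩
        | cons cd td =>
          refine Or.inr ⟨cd, ?_, ?_⟩
          · simp
          · have hdd : List.dropWhile q s.reverse = cd :: td := by rw [← hddef, hd]
            have : q cd = false := pv_dropWhile_cons_head hdd
            simpa [hq] using this
      obtain ⟨acc', hwords⟩ := by
        have := pv_go_last w.reverse hwRne hwns d.reverse [] [] harg
        exact this
      have hsplit₀ : PySem.Chars.split₀ s = acc'.reverse ++ [w.reverse] := by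
        rw [PySem.Chars.split₀, hs_eq]
        exact hwords
      have hlast : (PySem.Chars.split₀ s).getLastD [] = w.reverse := by
        rw [hsplit₀]; simp
      have hwordsne : PySem.Chars.split₀ s ≠ [] := by rw [hsplit₀]; simp
      -- unfold one step of each loop
      rw [pvHashLoopA, pvTrimTail]
      rw [hdw]
      simp only [← hq]
      simp only [← hwdef]
      by_cases hhash : w.getLast? = some '#'
      · -- both loops drop the last word and continue
        have hswA : PySem.Chars.startswith ((PySem.Chars.split₀ s).getLastD []) ['#'] = true := by
          rw [hlast, PySem.Chars.startswith, ← Bool.decide_iff (_ = true)]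
          simp only [List.isPrefixOf_iff_prefix, pv_hash_prefix_iff]
          simp [hhash]
        rw [if_pos ⟨hnil, hwordsne, hswA⟩, dif_pos ⟨hwne, hhash⟩]
        have hrf : PySem.Chars.rfind s ((PySem.Chars.split₀ s).getLastD []) =
            (d.reverse.length : Int) := by
          rw [hlast]
          conv_lhs => rw [hs_eq]
          exact pv_rfind_append _ _
        have hslice : PySem.Chars.slice s none
            (some (PySem.Chars.rfind s ((PySem.Chars.split₀ s).getLastD []))) = d.reverse := by
          rw [hrf, PySem.Chars.slice_eq_listSlice, PySem.List.slice_to _ (by positivity)]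
          rw [Int.toNat_natCast]
          conv_lhs => rw [hs_eq]
          exact List.take_left
        rw [hslice]
        have hdrop : (s.reverse.drop w.length) = d := by
          conv_lhs => rw [hsplit]
          simp
        rw [hdrop]
        have hlen1 := pv_rstrip_length_le d.reverse
        have hlen2 : d.reverse.length < s.length := by
          rw [hs_eq]
          simp only [List.length_append, List.length_reverse]
          have : 0 < w.length := List.length_pos_iff.mpr hwne
          omega
        rw [ih _ (pv_rstrip_idem _) (by omega)]
        congr 1
        have hrr : (PySem.Chars.rstrip d.reverse).reverse =
            List.dropWhile PySem.Chars.isspace d := by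
          simp [PySem.Chars.rstrip]
        rw [hrr]
        exact pv_trim_dropWhile d
      · have hcond : ¬(s ≠ [] ∧ PySem.Chars.split₀ s ≠ [] ∧
            PySem.Chars.startswith ((PySem.Chars.split₀ s).getLastD []) ['#'] = true) := by
          rintro ⟨-, -, hsw⟩
          rw [hlast, PySem.Chars.startswith] at hsw
          rw [List.isPrefixOf_iff_prefix, pv_hash_prefix_iff] at hsw
          rw [List.head?_reverse] at hsw
          exact hhash hsw
        rw [if_neg hcond, dif_neg (by rintro ⟨-, h2⟩; exact hhash h2)]
        simp


theorem pv_strip_eq (t : List Char) : pvStripA t = pvStripB t := by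
  by_cases h : t.length < 50
  · simp [pvStripA, pvStripB, h]
  · have h0 : ¬(t.length = 0 ∨ t.length < 50) := by omega
    simp only [pvStripA, pvStripB, if_neg h, if_neg h0]
    rw [pv_popNav_eq_dropWhile]
    set t1 : List Char := PySem.Chars.lstrip (PySem.Chars.join ['\n']
      ((PySem.Chars.splitOn t ['\n']).dropWhile
        (fun l => pvNav.contains (PySem.Chars.lower (PySem.Chars.strip l))))) with ht1
    set L : List Char := PySem.Chars.lower t1 with hL
    have hLlen : L.length = t1.length := by simp [hL, PySem.Chars.lower]
    have hcut : pvFormMarkers.foldl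
        (fun cut marker =>
          let idx := PySem.Chars.find L (PySem.Chars.lower marker.toList)
          if idx ≠ -1 ∧ idx < cut then idx else cut)
        (t1.length : Int) = ((pvScanCut L 0 : Nat) : Int) := by
      have hm : (pvFormMarkers.map (fun m => PySem.Chars.lower m.toList)).foldl
          (pvFoldF L) (L.length : Int) =
          pvFormMarkers.foldl
            (fun cut marker =>
              let idx := PySem.Chars.find L (PySem.Chars.lower marker.toList)
              if idx ≠ -1 ∧ idx < cut then idx else cut)
            (L.length : Int) := by
        rw [List.foldl_map]
        rfl
      rw [← hLlen, ← hm, pv_markers_lower, pv_cut_core]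
    rw [hcut]
    have hsl : (if ((pvScanCut L 0 : Nat) : Int) < (t1.length : Int)
        then PySem.Chars.slice t1 none (some ((pvScanCut L 0 : Nat) : Int)) else t1) =
        PySem.Chars.slice t1 none (some ((pvScanCut L 0 : Nat) : Int)) := by
      split
      · rfl
      · have hge : pvScanCut L 0 = t1.length := by
          have := pv_scan_le L 0
          omega
        rw [hge, PySem.Chars.slice_eq_listSlice, PySem.List.slice_to _ (by positivity),
          Int.toNat_natCast, List.take_length]
    rw [hsl]
    set t2 : List Char := PySem.Chars.slice t1 none (some ((pvScanCut L 0 : Nat) : Int)) with ht2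
    rw [pv_tail_eq ((PySem.Chars.rstrip t2).length + 1) (PySem.Chars.rstrip t2)
      (pv_rstrip_idem t2) (by omega)]
    congr 1
    have hrr : (PySem.Chars.rstrip t2).reverse =
        List.dropWhile PySem.Chars.isspace t2.reverse := by
      simp [PySem.Chars.rstrip]
    rw [hrr]
    exact pv_trim_dropWhile t2.reverse

-- ===== VERDICT (by name: the statement is the Claim_ definition above) =====
theorem strip_application_form_junk_py_spec : Claim_equal_strip_application_form_junk_py := by
  intro text _
  unfold Spec_strip_application_form_junk_py strip_application_form_junk_py strip_application_form_junk_py_alt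
  exact congrArg String.ofList (pv_strip_eq text.toList)
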